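-- pv_equiv track=rewrite | github.com/awnion/contests | codeforces/gym/gym_102906/f.py | make_next_positions
-- ===== SOURCE A (Python) =====
-- def make_next_positions(a, n, k):
--     positions = [n + 1] * ((n + 2)*(k + 1))
--     for el in range(k):
--         cur = n + 1
--         for i in range(n - 1, -1, -1):
--             if a[i] == el + 1:
--                 cur = i + 1
--             positions[i*k + el] = cur
--     return positions
-- ===== SOURCE B (Python) =====
-- def make_next_positions(a, n, k):
--     rows = []
--     nxt = [n + 1] * (k + 1)
--     for i in range(n - 1, -1, -1):
--         v = a[i]
--         if 1 <= v <= k: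
--             nxt[v] = i + 1
--         rows.append(nxt[1:])
--     flat = [x for row in reversed(rows) for x in row]
--     flat.extend([n + 1] * ((n + 2) * (k + 1) - len(flat)))
--     return flat
-- ===== Notes on version B (the rewrite author's own statement) =====
-- stated objective: alternative
-- what changed: B builds the table by construction instead of mutation: one backward sweep over a maintains a next-occurrence array for all k values at once and collects each finished row via a slice, then reverses, flattens and pads the rows to the table size, replacing A's k independent backward rescans that write into a preallocated flat array cell by cell.
-- outside the precondition, e.g. on make_next_positions([], 1, 0): A returns [2, 2, 2], B raises IndexError
import Mathlib
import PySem

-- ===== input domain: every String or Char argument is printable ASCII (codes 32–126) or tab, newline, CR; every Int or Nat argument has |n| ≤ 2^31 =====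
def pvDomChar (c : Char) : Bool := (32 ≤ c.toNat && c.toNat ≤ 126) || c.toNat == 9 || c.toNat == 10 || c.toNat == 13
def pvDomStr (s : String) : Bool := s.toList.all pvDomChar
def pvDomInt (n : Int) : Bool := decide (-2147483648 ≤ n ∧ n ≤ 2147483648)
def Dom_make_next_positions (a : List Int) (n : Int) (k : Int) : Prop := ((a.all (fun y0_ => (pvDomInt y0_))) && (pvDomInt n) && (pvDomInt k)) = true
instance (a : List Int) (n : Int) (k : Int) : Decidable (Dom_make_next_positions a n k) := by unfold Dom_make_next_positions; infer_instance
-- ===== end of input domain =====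

-- B builds the table by construction — one backward sweep collecting finished rows, then
-- reverse, flatten and pad — instead of A's k backward rescans writing into a flat array
-- (objective: alternative; same O(n*k) work).

-- ===== PORT A =====
-- a[i] is read only for 0 ≤ i < n; Pre_ guarantees i < a.length there, so the default 0 is never used inside Pre_.
-- `positions = [n+1]*((n+2)*(k+1))` is the fold's initial state (threaded, since the loop mutates it)
def make_next_positions (a : List Int) (n : Int) (k : Int) : List Int :=
  (PySem.List.pyRange 0 k 1).foldl (fun positions el =>
    ((PySem.List.pyRange (n - 1) (-1) (-1)).foldl
      (fun (st : Int × List Int) i =>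
        let cur := if PySem.List.pyGetD a i 0 = el + 1 then i + 1 else st.1
        (cur, st.2.set (i * k + el).toNat cur))
      (n + 1, positions)).2) (List.replicate ((n + 2) * (k + 1)).toNat (n + 1))

-- ===== PORT B =====
-- state of the sweep = (nxt, rows); `rows.append(nxt[1:])` is `st.2 ++ [slice st.1 1 none]`;
-- the comprehension over reversed(rows) is `.reverse.flatMap`, `.extend` is `++ replicate`
def make_next_positions_alt (a : List Int) (n : Int) (k : Int) : List Int :=
  let st := (PySem.List.pyRange (n - 1) (-1) (-1)).foldl
    (fun (st : List Int × List (List Int)) i =>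
      let v := PySem.List.pyGetD a i 0
      let nxt := if 1 ≤ v ∧ v ≤ k then st.1.set v.toNat (i + 1) else st.1
      (nxt, st.2 ++ [PySem.List.slice nxt (some 1) none]))
    (List.replicate (k + 1).toNat (n + 1), [])
  let flat := st.2.reverse.flatMap (fun row => row)
  flat ++ List.replicate ((n + 2) * (k + 1) - PySem.List.len flat).toNat (n + 1)

-- ===== PRECONDITION & SPEC =====
-- Pre_ excludes inputs with 1 ≤ n and a.length < n: there Python B's single sweep reads a[i] and
-- raises IndexError, while Python A raises too when k ≥ 1 but returns an untouched table when k ≤ 0.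
def Pre_make_next_positions (a : List Int) (n : Int) (k : Int) : Prop :=
  n ≤ 0 ∨ n ≤ (a.length : Int)
instance (a : List Int) (n : Int) (k : Int) : Decidable (Pre_make_next_positions a n k) := by
  unfold Pre_make_next_positions; infer_instance
def pvWitness_make_next_positions : List Int × Int × Int := ([1, 2, 1], 3, 2)

def Spec_make_next_positions (a : List Int) (n : Int) (k : Int) (out : List Int) : Prop := out = make_next_positions_alt a n k
instance (a : List Int) (n : Int) (k : Int) (out : List Int) : Decidable (Spec_make_next_positions a n k out) := by unfold Spec_make_next_positions; infer_instance

-- ===== CLAIM (what is proved, stated in full; the proofs are below) =====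
def Claim_equal_make_next_positions : Prop := ∀ (a : List Int) (n : Int) (k : Int), Dom_make_next_positions a n k → Pre_make_next_positions a n k → Spec_make_next_positions a n k (make_next_positions a n k)

-- ===== LEMMAS AND PROOFS =====

-- the value both programs store in cell (i*k + el): position (1-based) of the next occurrence of el+1 at index ≥ i, else n+1
def nextv (a : List Int) (n el i : Int) : Int :=
  if _h : i < n then
    (if PySem.List.pyGetD a i 0 = el + 1 then i + 1 else nextv a n el (i + 1))
  else n + 1
termination_by (n - i).toNat
decreasing_by omega

lemma nextv_base (a : List Int) (n el i : Int) (h : n ≤ i) : nextv a n el i = n + 1 := by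
  rw [nextv]; simp [Int.not_lt.2 h]

lemma nextv_unfold (a : List Int) (n el i : Int) (h : i < n) :
    nextv a n el i = if PySem.List.pyGetD a i 0 = el + 1 then i + 1 else nextv a n el (i + 1) := by
  rw [nextv]; simp [h]

-- the per-cell value as a function of the flat index alone
def fv (a : List Int) (n k : Int) (j : Nat) : Int :=
  nextv a n ((j : Int) % k) ((j : Int) / k)

-- the single write both programs perform at flat cell j
def gset (a : List Int) (n k : Int) (p : List Int) (j : Nat) : List Int :=
  p.set j (fv a n k j)

lemma idx_divmod {k el i : Int} (h0 : 0 ≤ el) (h1 : el < k) :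
    (i * k + el) % k = el ∧ (i * k + el) / k = i := by
  have hk : k ≠ 0 := by omega
  have he : i * k + el = el + k * i := by ring
  rw [he]
  constructor
  · rw [Int.add_mul_emod_self_left, Int.emod_eq_of_lt h0 h1]
  · rw [Int.add_mul_ediv_left _ _ hk, Int.ediv_eq_zero_of_lt h0 h1]; ring

lemma idx_cast {k : Int} (hk : 0 < k) (m el : Nat) :
    ((m * k.toNat + el : Nat) : Int) = (m : Int) * k + (el : Int) := by
  push_cast
  rw [Int.toNat_of_nonneg hk.le]

lemma fv_at (a : List Int) {n k : Int} (hk : 0 < k) (i el : Nat) (hel : (el : Int) < k) :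
    fv a n k (i * k.toNat + el) = nextv a n (el : Int) (i : Int) := by
  have hc := idx_cast hk i el
  have hd := idx_divmod (k := k) (el := (el : Int)) (i := (i : Int)) (by positivity) hel
  simp only [fv, hc, hd.1, hd.2]

lemma gset_at (a : List Int) {n k : Int} (hk : 0 < k) (m el : Nat) (hel : (el : Int) < k) (p : List Int) :
    gset a n k p (m * k.toNat + el) = p.set (((m : Int) * k + (el : Int)).toNat) (nextv a n el m) := by
  have hc := idx_cast hk m el
  simp only [gset, fv_at a hk m el hel]
  congr 1
  omega

-- ===== A-side characterisation =====

lemma A_inner (a : List Int) (n k : Int) (hk : 0 < k) (el : Nat) (hel : (el : Int) < k) :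
    ∀ (m : Nat), (m : Int) ≤ n → ∀ (pos : List Int) (cur : Int), cur = nextv a n el m →
    (PySem.List.pyRange ((m : Int) - 1) (-1) (-1)).foldl
        (fun (st : Int × List Int) i =>
          let cur := if PySem.List.pyGetD a i 0 = (el : Int) + 1 then i + 1 else st.1
          (cur, st.2.set (i * k + (el : Int)).toNat cur)) (cur, pos)
      = (nextv a n el 0,
         ((List.range m).reverse.map (fun i => i * k.toNat + el)).foldl (gset a n k) pos) := by
  intro m
  induction m with
  | zero =>
      intro _ pos cur hcur
      rw [PySem.List.pyRange_neg_one_eq_nil (by omega)]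
      simp [hcur]
  | succ m ih =>
      intro hm pos cur hcur
      have hm' : (m : Int) < n := by push_cast at hm ⊢; omega
      have h1 : ((m + 1 : Nat) : Int) - 1 = (m : Int) := by push_cast; ring
      rw [h1, PySem.List.pyRange_neg_one_cons (by omega)]
      simp only [List.foldl_cons]
      have hcur1 : (if PySem.List.pyGetD a (m : Int) 0 = (el : Int) + 1 then (m : Int) + 1 else cur)
          = nextv a n el m := by
        rw [nextv_unfold a n el m hm', hcur]
        push_cast
        rfl
      rw [List.range_succ, List.reverse_append, List.reverse_singleton, List.singleton_append,
        List.map_cons, List.foldl_cons]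
      rw [gset_at a hk m el hel, ← hcur1]
      exact ih (by omega) _ _ hcur1

lemma A_char (a : List Int) (n k : Int) (hn : 0 < n) (hk : 0 < k) :
    make_next_positions a n k
      = ((List.range k.toNat).flatMap
          (fun el => (List.range n.toNat).reverse.map (fun i => i * k.toNat + el))).foldl
          (gset a n k) (List.replicate ((n + 2) * (k + 1)).toNat (n + 1)) := by
  unfold make_next_positions
  rw [List.foldl_flatMap, PySem.List.pyRange_zero, List.foldl_map]
  apply PySem.List.foldl_congr_mem
  intro pos el hel
  have hel' : (el : Int) < k := by
    have := List.mem_range.1 hel; omega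
  have hn' : ((n.toNat : Nat) : Int) = n := Int.toNat_of_nonneg hn.le
  have h1 : n - 1 = ((n.toNat : Nat) : Int) - 1 := by omega
  have h2 : n + 1 = nextv a n el n.toNat := by rw [nextv_base a n el _ (by omega)]
  rw [h1, h2, A_inner a n k hk el hel' n.toNat (by omega) pos _ rfl]

-- pointwise description of a fold of single-cell writes whose value depends on the cell alone
lemma length_foldl_gset (a : List Int) (n k : Int) :
    ∀ (L : List Nat) (p : List Int), (L.foldl (gset a n k) p).length = p.length := by
  intro L
  induction L with
  | nil => intro p; rfl
  | cons j tl ih => intro p; rw [List.foldl_cons, ih]; simp [gset]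

lemma getElem?_foldl_gset (a : List Int) (n k : Int) :
    ∀ (L : List Nat) (p : List Int) (m : Nat), m < p.length →
    (L.foldl (gset a n k) p)[m]? = if m ∈ L then some (fv a n k m) else p[m]? := by
  intro L
  induction L with
  | nil => intro p m _; simp
  | cons j tl ih =>
      intro p m hm
      rw [List.foldl_cons, ih _ m (by simp [gset, hm])]
      by_cases hmem : m ∈ tl
      · simp [hmem]
      · by_cases hj : m = j
        · subst hj
          simp [hmem, gset, hm]
        · simp [hmem, hj, gset, Ne.symm hj]

-- which flat cells A's sweep writes: exactly the first n*k
lemma mem_LA (N K : Nat) (hK : 0 < K) (m : Nat) :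
    m ∈ (List.range K).flatMap (fun el => (List.range N).reverse.map (fun i => i * K + el))
      ↔ m < N * K := by
  simp only [List.mem_flatMap, List.mem_map, List.mem_reverse, List.mem_range]
  constructor
  · rintro ⟨el, hel, i, hi, rfl⟩
    calc i * K + el < i * K + K := by omega
      _ = (i + 1) * K := by ring
      _ ≤ N * K := Nat.mul_le_mul_right K (by omega)
  · intro hm
    refine ⟨m % K, Nat.mod_lt _ hK, m / K, (Nat.div_lt_iff_lt_mul hK).2 hm, ?_⟩
    rw [Nat.mul_comm]
    exact Nat.div_add_mod m K

lemma NK_le_T {n k : Int} (hn : 0 < n) (hk : 0 < k) :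
    ((n.toNat * k.toNat : Nat) : Int) = n * k ∧ n.toNat * k.toNat ≤ ((n + 2) * (k + 1)).toNat := by
  have h1 : ((n.toNat * k.toNat : Nat) : Int) = n * k := by
    push_cast
    rw [Int.toNat_of_nonneg hn.le, Int.toNat_of_nonneg hk.le]
  have h2 : (n + 2) * (k + 1) = n * k + (n + 2 * k + 2) := by ring
  refine ⟨h1, ?_⟩
  generalize hM : n.toNat * k.toNat = M at h1 ⊢
  omega

lemma A_eq_E (a : List Int) (n k : Int) (hn : 0 < n) (hk : 0 < k) :
    make_next_positions a n k
      = (List.range (n.toNat * k.toNat)).map (fv a n k)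
        ++ List.replicate (((n + 2) * (k + 1)).toNat - n.toNat * k.toNat) (n + 1) := by
  obtain ⟨hcast, hle⟩ := NK_le_T hn hk
  rw [A_char a n k hn hk]
  apply List.ext_getElem?
  intro m
  by_cases hm : m < ((n + 2) * (k + 1)).toNat
  · rw [getElem?_foldl_gset a n k _ _ m (by simpa using hm)]
    simp only [mem_LA n.toNat k.toNat (by omega : 0 < k.toNat) m]
    by_cases hNK : m < n.toNat * k.toNat
    · rw [if_pos hNK, List.getElem?_append_left (by simpa using hNK)]
      simp [hNK]
    · rw [if_neg hNK, List.getElem?_append_right (by simpa using hNK)]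
      simp only [List.length_map, List.length_range]
      rw [List.getElem?_replicate, List.getElem?_replicate]
      rw [if_pos hm, if_pos (by omega)]
  · rw [List.getElem?_eq_none (by rw [length_foldl_gset]; simpa using hm),
      List.getElem?_eq_none (by simp; omega)]

-- ===== B-side characterisation =====

-- the `nxt` array after the sweep has processed indices ≥ m
def nxtvec (a : List Int) (n k : Int) (m : Nat) : List Int :=
  (n + 1) :: (List.range k.toNat).map (fun el : Nat => nextv a n (el : Int) (m : Int))

-- row i of the table = nxt[1:] right after the sweep has processed index i
def rowvec (a : List Int) (n k : Int) (i : Nat) : List Int :=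
  (List.range k.toNat).map (fun el : Nat => nextv a n (el : Int) (i : Int))

lemma slice_nxtvec (a : List Int) (n k : Int) (m : Nat) :
    PySem.List.slice (nxtvec a n k m) (some 1) none = rowvec a n k m := by
  rw [PySem.List.slice_from_one]
  rfl

lemma nxtvec_init (a : List Int) (n k : Int) (hk : 0 < k) (m : Nat) (hm : n ≤ (m : Int)) :
    List.replicate (k + 1).toNat (n + 1) = nxtvec a n k m := by
  have h1 : (k + 1).toNat = k.toNat + 1 := by omega
  rw [h1, List.replicate_succ, nxtvec]
  congr 1
  apply List.ext_getElem
  · simp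
  · intro i h1 h2
    simp [nextv_base a n _ m hm]

lemma nxt_step (a : List Int) {n k : Int} (hk : 0 < k) (m : Nat) (hmn : (m : Int) < n) :
    (if 1 ≤ PySem.List.pyGetD a (m : Int) 0 ∧ PySem.List.pyGetD a (m : Int) 0 ≤ k then
        (nxtvec a n k (m + 1)).set (PySem.List.pyGetD a (m : Int) 0).toNat ((m : Int) + 1)
      else nxtvec a n k (m + 1))
    = nxtvec a n k m := by
  set v := PySem.List.pyGetD a (m : Int) 0 with hv
  have key : ∀ el : Nat, nextv a n (el : Int) (m : Int)
      = if v = (el : Int) + 1 then (m : Int) + 1 else nextv a n (el : Int) ((m + 1 : Nat) : Int) := by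
    intro el
    have hc1 : ((m + 1 : Nat) : Int) = (m : Int) + 1 := by push_cast; ring
    rw [hc1, nextv_unfold a n el m hmn, ← hv]
  by_cases hc : 1 ≤ v ∧ v ≤ k
  · rw [if_pos hc]
    obtain ⟨s, hs⟩ : ∃ s, v.toNat = s + 1 := ⟨v.toNat - 1, by omega⟩
    have hsK : s < k.toNat := by omega
    have hvs : v = (s : Int) + 1 := by omega
    rw [hs]
    simp only [nxtvec, List.set_cons_succ]
    congr 1
    apply List.ext_getElem
    · simp
    · intro e h1 h2
      have heK : e < k.toNat := by simpa using h2
      by_cases hes : s = e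
      · subst hes
        rw [List.getElem_set_self h1, List.getElem_map, List.getElem_range, key s, if_pos hvs]
      · rw [List.getElem_set_ne hes h1, List.getElem_map, List.getElem_map,
          List.getElem_range, key e, if_neg (by intro h; apply hes; omega)]
  · rw [if_neg hc]
    simp only [nxtvec]
    congr 1
    apply List.map_congr_left
    intro el hel
    have helK : el < k.toNat := List.mem_range.1 hel
    have hne : v ≠ (el : Int) + 1 := by
      intro h
      exact hc ⟨by omega, by omega⟩
    rw [key el, if_neg hne]

-- B's sweep, characterised: nxt reaches nxtvec 0 and rows collects the rows top index first
lemma B_loop (a : List Int) (n k : Int) (hk : 0 < k) :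
    ∀ (m : Nat), (m : Int) ≤ n → ∀ (rows : List (List Int)) (nxt : List Int), nxt = nxtvec a n k m →
    (PySem.List.pyRange ((m : Int) - 1) (-1) (-1)).foldl
        (fun (st : List Int × List (List Int)) i =>
          let v := PySem.List.pyGetD a i 0
          let nxt := if 1 ≤ v ∧ v ≤ k then st.1.set v.toNat (i + 1) else st.1
          (nxt, st.2 ++ [PySem.List.slice nxt (some 1) none]))
        (nxt, rows)
      = (nxtvec a n k 0, rows ++ (List.range m).reverse.map (rowvec a n k)) := by
  intro m
  induction m with
  | zero =>
      intro _ rows nxt hnxt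
      rw [PySem.List.pyRange_neg_one_eq_nil (by omega)]
      simp [hnxt]
  | succ m ih =>
      intro hm rows nxt hnxt
      have hm' : (m : Int) < n := by push_cast at hm ⊢; omega
      have h1 : ((m + 1 : Nat) : Int) - 1 = (m : Int) := by push_cast; ring
      rw [h1, PySem.List.pyRange_neg_one_cons (by omega)]
      simp only [List.foldl_cons]
      have hnxt' : (if 1 ≤ PySem.List.pyGetD a (m : Int) 0 ∧ PySem.List.pyGetD a (m : Int) 0 ≤ k then
          nxt.set (PySem.List.pyGetD a (m : Int) 0).toNat ((m : Int) + 1) else nxt) = nxtvec a n k m := by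
        rw [hnxt]; exact nxt_step a hk m hm'
      simp only [hnxt', slice_nxtvec]
      rw [ih (by omega) _ _ rfl]
      rw [List.range_succ, List.reverse_append, List.reverse_singleton, List.singleton_append,
        List.map_cons, List.append_assoc]
      rfl

-- the flattened rows are exactly the first n*k cells of the table
lemma flatMap_rowvec (a : List Int) (n k : Int) (hk : 0 < k) :
    ∀ (N : Nat), (List.range N).flatMap (rowvec a n k) = (List.range (N * k.toNat)).map (fv a n k) := by
  intro N
  induction N with
  | zero => simp
  | succ N ih =>
      rw [List.range_succ, List.flatMap_append, ih, List.flatMap_cons, List.flatMap_nil,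
        List.append_nil]
      have h1 : (N + 1) * k.toNat = N * k.toNat + k.toNat := by ring
      rw [h1, List.range_add, List.map_append, List.map_map]
      congr 1
      apply List.map_congr_left
      intro el hel
      have helK : el < k.toNat := List.mem_range.1 hel
      simp only [Function.comp]
      rw [fv_at a hk N el (by omega)]

lemma B_eq_E (a : List Int) (n k : Int) (hn : 0 < n) (hk : 0 < k) :
    make_next_positions_alt a n k
      = (List.range (n.toNat * k.toNat)).map (fv a n k)
        ++ List.replicate (((n + 2) * (k + 1)).toNat - n.toNat * k.toNat) (n + 1) := by
  obtain ⟨hcast, hle⟩ := NK_le_T hn hk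
  unfold make_next_positions_alt
  have h1 : n - 1 = ((n.toNat : Nat) : Int) - 1 := by omega
  rw [h1, B_loop a n k hk n.toNat (by omega) _ _ (nxtvec_init a n k hk n.toNat (by omega))]
  simp only [List.nil_append, List.map_reverse, List.reverse_reverse]
  have hflat : (List.map (rowvec a n k) (List.range n.toNat)).flatMap (fun row => row)
      = (List.range (n.toNat * k.toNat)).map (fv a n k) := by
    rw [List.flatMap_map]
    simpa using flatMap_rowvec a n k hk n.toNat
  rw [hflat]
  congr 1
  rw [PySem.List.len_eq]
  simp only [List.length_map, List.length_range]
  generalize hM : n.toNat * k.toNat = M at hcast hle ⊢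
  have h2 : (n + 2) * (k + 1) = n * k + (n + 2 * k + 2) := by ring
  congr 1
  omega

-- ===== edge cases n ≤ 0 / k ≤ 0: neither loop writes, both return the untouched table =====

lemma A_edge_n (a : List Int) (n k : Int) (hn : n ≤ 0) :
    make_next_positions a n k = List.replicate ((n + 2) * (k + 1)).toNat (n + 1) := by
  unfold make_next_positions
  rw [PySem.List.pyRange_neg_one_eq_nil (by omega : n - 1 ≤ -1)]
  simp only [List.foldl_nil]
  rw [PySem.List.foldl_congr_mem _ _ (fun acc x => acc) _ (by intro acc x _; rfl),
    PySem.List.foldl_ignore]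

lemma A_edge_k (a : List Int) (n k : Int) (hk : k ≤ 0) :
    make_next_positions a n k = List.replicate ((n + 2) * (k + 1)).toNat (n + 1) := by
  unfold make_next_positions
  rw [PySem.List.pyRange_one_eq_nil (by omega : k ≤ 0)]
  rfl

lemma B_edge_n (a : List Int) (n k : Int) (hn : n ≤ 0) :
    make_next_positions_alt a n k = List.replicate ((n + 2) * (k + 1)).toNat (n + 1) := by
  unfold make_next_positions_alt
  rw [PySem.List.pyRange_neg_one_eq_nil (by omega : n - 1 ≤ -1)]
  simp [PySem.List.len]

lemma foldl_const_rows (c : List Int) :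
    ∀ (L : List Int) (rows : List (List Int)),
    L.foldl (fun (st : List Int × List (List Int)) _ =>
        (st.1, st.2 ++ [PySem.List.slice st.1 (some 1) none])) (c, rows)
      = (c, rows ++ List.replicate L.length (PySem.List.slice c (some 1) none)) := by
  intro L
  induction L with
  | nil => intro rows; simp
  | cons x tl ih =>
      intro rows
      rw [List.foldl_cons, ih]
      simp [List.replicate_succ, List.append_assoc]

lemma flatMap_replicate_nil (t : Nat) :
    (List.replicate t ([] : List Int)).flatMap (fun row => row) = [] := by
  induction t with
  | zero => rfl
  | succ t ih => rw [List.replicate_succ, List.flatMap_cons, ih]; rfl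

lemma B_edge_k (a : List Int) (n k : Int) (hk : k ≤ 0) :
    make_next_positions_alt a n k = List.replicate ((n + 2) * (k + 1)).toNat (n + 1) := by
  unfold make_next_positions_alt
  have hbody : (fun (st : List Int × List (List Int)) (i : Int) =>
      let v := PySem.List.pyGetD a i 0
      let nxt := if 1 ≤ v ∧ v ≤ k then st.1.set v.toNat (i + 1) else st.1
      (nxt, st.2 ++ [PySem.List.slice nxt (some 1) none]))
      = (fun (st : List Int × List (List Int)) _ =>
          (st.1, st.2 ++ [PySem.List.slice st.1 (some 1) none])) := by
    funext st i
    simp only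
    rw [if_neg (by omega)]
  rw [hbody, foldl_const_rows]
  have hslice : PySem.List.slice (List.replicate (k + 1).toNat ((n : Int) + 1)) (some 1) none
      = [] := by
    rw [PySem.List.slice_from_one]
    have h1 : (k + 1).toNat ≤ 1 := by omega
    interval_cases h : (k + 1).toNat <;> simp [List.replicate_succ]
  rw [hslice]
  simp only [List.nil_append, List.reverse_replicate, flatMap_replicate_nil]
  simp [PySem.List.len]

-- ===== VERDICT (by name: the statement is the Claim_ definition above) =====
theorem make_next_positions_spec : Claim_equal_make_next_positions := by
  intro a n k _hdom _hpre
  unfold Spec_make_next_positions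
  by_cases hn : n ≤ 0
  · rw [A_edge_n a n k hn, B_edge_n a n k hn]
  by_cases hk : k ≤ 0
  · rw [A_edge_k a n k hk, B_edge_k a n k hk]
  replace hn : 0 < n := by omega
  replace hk : 0 < k := by omega
  rw [A_eq_E a n k hn hk, B_eq_E a n k hn hk]
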